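-- pv_equiv track=rewrite | github.com/Sagar4437/DSA-with-Kunal | Lect 8- Array/1512. Number of Good Pairs | Leetcode .py | numIdenticalPairs
-- ===== SOURCE A (Python) =====
-- from typing import List
--
-- def numIdenticalPairs(nums: List[int]) -> int:
--     c = 0
--     l = len(nums)
--     for i in range(l):
--         for j in range(i+1,l):
--             if nums[i] == nums[j]:
--                 c +=1
--
--     return c
-- ===== SOURCE B (Python) =====
-- from typing import List
--
-- def numIdenticalPairs(nums: List[int]) -> int:
--     counts = {}
--     for x in nums:
--         counts[x] = counts.get(x, 0) + 1
--     return sum(c * (c - 1) // 2 for c in counts.values())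
-- ===== Notes on version B (the rewrite author's own statement) =====
-- stated objective: faster
-- what changed: Replaces the quadratic all-pairs double loop by a single counting pass over a hash map followed by summing c*(c-1)//2 per distinct value.
import Mathlib
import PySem

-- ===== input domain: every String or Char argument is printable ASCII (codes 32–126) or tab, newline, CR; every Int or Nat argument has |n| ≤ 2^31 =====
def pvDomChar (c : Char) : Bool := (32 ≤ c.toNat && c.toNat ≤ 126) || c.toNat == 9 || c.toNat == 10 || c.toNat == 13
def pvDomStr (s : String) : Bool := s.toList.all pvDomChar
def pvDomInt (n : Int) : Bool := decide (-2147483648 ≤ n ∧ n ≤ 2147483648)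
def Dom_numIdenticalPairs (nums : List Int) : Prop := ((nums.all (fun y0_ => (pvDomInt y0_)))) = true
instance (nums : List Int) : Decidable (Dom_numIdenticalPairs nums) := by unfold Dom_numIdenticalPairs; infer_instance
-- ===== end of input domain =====

-- B replaces A's quadratic all-pairs double loop by one counting pass (dict of multiplicities)
-- and sums c*(c-1)//2 per distinct value; objective: faster (asymptotic, O(n^2) → O(n)).

-- ===== PORT A =====
def numIdenticalPairs (nums : List Int) : Int :=
  let c : Int := 0
  let l : Int := PySem.List.len nums
  (PySem.List.pyRange 0 l).foldl (fun c i =>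
    (PySem.List.pyRange (i + 1) l).foldl (fun c j =>
      if PySem.List.pyGetD nums i 0 == PySem.List.pyGetD nums j 0 then c + 1 else c) c) c

-- ===== PORT B =====
def numIdenticalPairs_alt (nums : List Int) : Int :=
  let counts : PySem.Dict Int Int :=
    nums.foldl (fun d x => d.insert x (d.getD x 0 + 1)) PySem.Dict.empty
  (PySem.Dict.values counts).foldl (fun s c => s + PySem.Int.floordiv (c * (c - 1)) 2) 0

-- ===== PRECONDITION & SPEC =====
def Spec_numIdenticalPairs (nums : List Int) (out : Int) : Prop := out = numIdenticalPairs_alt nums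
instance (nums : List Int) (out : Int) : Decidable (Spec_numIdenticalPairs nums out) := by unfold Spec_numIdenticalPairs; infer_instance

-- ===== CLAIM (what is proved, stated in full; the proofs are below) =====
def Claim_equal_numIdenticalPairs : Prop := ∀ (nums : List Int), Dom_numIdenticalPairs nums → Spec_numIdenticalPairs nums (numIdenticalPairs nums)

-- ===== LEMMAS AND PROOFS =====

/-- Number of equal pairs, head recursion: the canonical middle ground both ports reach. -/
def pvPairs : List Int → Int
  | [] => 0
  | x :: t => (t.count x : Int) + pvPairs t

theorem pvPairs_append (xs : List Int) (y : Int) :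
    pvPairs (xs ++ [y]) = pvPairs xs + (xs.count y : Int) := by
  induction xs with
  | nil => simp [pvPairs]
  | cons x t ih =>
    simp only [List.cons_append, pvPairs, ih, List.count_append, List.count_cons,
      List.count_nil]
    by_cases h : x = y
    · subst h; simp; ring
    · simp [h, Ne.symm h]; ring

theorem pvCountP_beq_left (v : Int) (l : List Int) :
    l.countP (fun w => v == w) = l.count v := by
  induction l with
  | nil => rfl
  | cons x t ih =>
    rw [List.countP_cons, List.count_cons, ih]
    by_cases h : v = x
    · subst h; simp
    · simp [h, Ne.symm h]

theorem pvComb_succ (c : Int) :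
    PySem.Int.floordiv ((c + 1) * c) 2 = PySem.Int.floordiv (c * (c - 1)) 2 + c := by
  obtain ⟨t, ht⟩ := Int.even_mul_succ_self (c - 1)
  have h1 : (c + 1) * c = 2 * (t + c) := by linear_combination ht
  have h2 : c * (c - 1) = 2 * t := by linear_combination ht
  rw [h1, h2, PySem.Int.floordiv_eq_ediv_of_pos (by norm_num),
    PySem.Int.floordiv_eq_ediv_of_pos (by norm_num),
    Int.mul_ediv_cancel_left _ (by norm_num), Int.mul_ediv_cancel_left _ (by norm_num)]

/-- Sum over a nodup list when exactly the entry at `y` grows by `δ`. -/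
theorem pvSum_map_update (s : List Int) (f g : Int → Int) (y δ : Int)
    (hs : s.Nodup) (hy : y ∈ s) (hg : ∀ k ∈ s, k ≠ y → g k = f k)
    (hgy : g y = f y + δ) : (s.map g).sum = (s.map f).sum + δ := by
  induction s with
  | nil => simp at hy
  | cons x t ih =>
    rcases List.mem_cons.mp hy with h | h
    · subst h
      have : t.map g = t.map f := by
        apply List.map_congr_left
        intro k hk
        exact hg k (List.mem_cons_of_mem _ hk) (fun he => (List.nodup_cons.mp hs).1 (he ▸ hk))
      simp [this, hgy]; ring
    · have hx : x ≠ y := fun he => (List.nodup_cons.mp hs).1 (he ▸ h)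
      have := ih (List.nodup_cons.mp hs).2 h (fun k hk => hg k (List.mem_cons_of_mem _ hk))
      simp [this, hg x (List.mem_cons_self) hx]; ring

theorem pvSumB (xs : List Int) :
    ((PySem.Set.ofList xs).map
      (fun k => PySem.Int.floordiv ((xs.count k : Int) * ((xs.count k : Int) - 1)) 2)).sum
      = pvPairs xs := by
  induction xs using List.reverseRecOn with
  | nil => simp [pvPairs, PySem.Set.ofList]
  | append_singleton xs y ih =>
    rw [PySem.Set.ofList_append_singleton, pvPairs_append, ← ih]
    by_cases hy : y ∈ PySem.Set.ofList xs
    · rw [PySem.Set.add_of_mem hy]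
      apply pvSum_map_update (PySem.Set.ofList xs) _ _ y ((xs.count y : Int))
        (PySem.Set.nodup_ofList xs) hy
      · intro k hk hne
        have : (xs ++ [y]).count k = xs.count k := by
          simp [List.count_append, Ne.symm hne]
        rw [this]
      · have : (xs ++ [y]).count y = xs.count y + 1 := by
          simp [List.count_append]
        rw [this]
        push_cast
        have := pvComb_succ ((xs.count y : Int))
        calc PySem.Int.floordiv ((↑(xs.count y) + 1) * (↑(xs.count y) + 1 - 1)) 2
            = PySem.Int.floordiv ((↑(xs.count y) + 1) * (↑(xs.count y) : Int)) 2 := by ring_nf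
          _ = _ := by rw [this]
    · rw [PySem.Set.add_of_not_mem hy, List.map_append, List.sum_append]
      have hy' : y ∉ xs := by simpa [PySem.Set.mem_ofList] using hy
      have hmain : ((PySem.Set.ofList xs).map
          (fun k => PySem.Int.floordiv (((xs ++ [y]).count k : Int) * (((xs ++ [y]).count k : Int) - 1)) 2))
          = ((PySem.Set.ofList xs).map
          (fun k => PySem.Int.floordiv ((xs.count k : Int) * ((xs.count k : Int) - 1)) 2)) := by
        apply List.map_congr_left
        intro k hk
        have hk' : k ∈ xs := by simpa [PySem.Set.mem_ofList] using hk
        have hne : y ≠ k := by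
          intro h
          exact hy' (h ▸ hk')
        have : (xs ++ [y]).count k = xs.count k := by
          simp [List.count_append, hne]
        rw [this]
      rw [hmain]
      have hcy : (xs ++ [y]).count y = 1 := by
        simp [List.count_append, List.count_eq_zero_of_not_mem hy']
      simp [List.count_eq_zero_of_not_mem hy']

theorem pvAltEq (nums : List Int) : numIdenticalPairs_alt nums = pvPairs nums := by
  unfold numIdenticalPairs_alt
  rw [PySem.Dict.foldl_insert_getD_add_one_eq_counter,
    PySem.List.foldl_add ((PySem.Dict.counter nums).values)
      (fun c => PySem.Int.floordiv (c * (c - 1)) 2) 0]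
  have hv : (PySem.Dict.counter nums).values
      = (PySem.Set.ofList nums).map (fun k => ((nums.count k : Int))) := by
    simp only [PySem.Dict.values, PySem.Dict.items_counter, List.map_map]
    rfl
  rw [hv, List.map_map, zero_add, ← pvSumB nums]
  rfl

theorem pvSumA (xs : List Int) :
    ((List.range xs.length).map
      (fun k => ((xs.drop (k + 1)).count (xs.getD k 0) : Int))).sum = pvPairs xs := by
  induction xs with
  | nil => simp [pvPairs]
  | cons x t ih =>
    rw [List.length_cons, List.range_succ_eq_map]
    simp only [List.map_cons, List.map_map, List.sum_cons]
    have : (List.range t.length).map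
        ((fun k => (((x :: t).drop (k + 1)).count ((x :: t).getD k 0) : Int)) ∘ Nat.succ)
        = (List.range t.length).map (fun k => ((t.drop (k + 1)).count (t.getD k 0) : Int)) := by
      apply List.map_congr_left
      intro k _
      simp
    rw [this, ih]
    simp [pvPairs]

theorem pvAEq (nums : List Int) : numIdenticalPairs nums = pvPairs nums := by
  unfold numIdenticalPairs
  simp only [PySem.List.foldl_count_if, PySem.List.foldl_add]
  rw [zero_add]
  rw [PySem.List.pyRange_one 0 (PySem.List.len nums), List.map_map]
  have hlen : ((PySem.List.len nums - 0).toNat) = nums.length := by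
    simp [PySem.List.len_eq]
  rw [hlen, ← pvSumA nums]
  congr 1
  apply List.map_congr_left
  intro k hk
  have hk' : k < nums.length := List.mem_range.mp hk
  simp only [Function.comp]
  congr 1
  have h0 : (0 : Int) + (k : Int) = (k : Int) := by ring
  rw [h0]
  have hdrop : PySem.List.pyRange ((k : Int) + 1) (PySem.List.len nums)
      = PySem.List.pyRange ((k : Int) + 1) (PySem.List.len nums) := rfl
  have hmap := PySem.List.map_pyGetD_pyRange nums 0 (a := (k : Int) + 1) (by positivity)
  have hcnt : (PySem.List.pyRange ((k : Int) + 1) (PySem.List.len nums)).countP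
      (fun j => PySem.List.pyGetD nums (k : Int) 0 == PySem.List.pyGetD nums j 0)
      = (nums.drop (k + 1)).countP (fun w => PySem.List.pyGetD nums (k : Int) 0 == w) := by
    have : ((k : Int) + 1).toNat = k + 1 := by omega
    rw [← this, ← hmap, List.countP_map]
    rfl
  rw [hcnt, pvCountP_beq_left]
  simp

-- ===== VERDICT (by name: the statement is the Claim_ definition above) =====
theorem numIdenticalPairs_spec : Claim_equal_numIdenticalPairs := by
  intro nums _
  unfold Spec_numIdenticalPairs
  rw [pvAEq, pvAltEq]
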